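/-
  THE INVARIANT OF THE MDCT REGION: INVARIANTS.md §3.6, clauses M2, M3, M4, M6, M7 — as TWO groups of the top-level invariant,
      `MdctOK Blk mem f`      M2 M3 M4   the block sizes and the ten tables          established at SD.11 (the two init_blocksize)
      `BuffersOK Blk mem f`   M6 M7      the channel buffers / previous windows, `previous_length`   established at SD.10
  with the lemmas that USE each clause at a check site (`site_…`, result type `Site Live a n`), CARRY it (`transfer` and its
  instances) and ESTABLISH it in `start_decoder` / `init_blocksize` / `compute_bitreverse`.
  The documentation of the whole MDCT vocabulary is the header of Vorbis/Mdct.lean; read that first.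

  Ghost parameter: `Blk : Block → Prop`, "is an allocated block" (Vorbis/Blocks.lean). A SHAPE clause "`Block(p, n)`" is stated as
  `Blk ⟨p, n⟩`: the pointer field holds the base of THE allocated block of exactly that size (`init_blocksize` and the channel loop
  of `start_decoder` allocate exactly `2 n`, `2 n`, `n`, `2 n`, `n / 4` and `4 b1`, `2 b1` bytes). No structure, no frame lemma
  mentions the live set; only the USE lemmas do, through `hL : BlkLive Blk Live`.

  HD3 (= I5's M1: `blocksize_0 = 2 ^ a`, `blocksize_1 = 2 ^ b`, `6 ≤ a ≤ b ≤ 13`) belongs to the header clauses. It is RESTATED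
  here as `Mdct.HD3` (over the sizes as natural numbers, `bsize mem f 0 / 1` of Vorbis/Blocks.lean) and taken as a HYPOTHESIS by
  every lemma that needs it; `HD3.of_pow` builds it from the exponent form.  FY1 (`finalY`), listed with M6 in INVARIANTS, belongs
  to the floor clauses.
-/
import Vorbis.Mdct.Walks
namespace Vorbis.Mdct
open X86 X86.User Asan

/-! ### 0. Check sites on arrays of floats and of `uint16`: the generic lemmas

The pointer of an array is loaded once and kept in a register or a frame slot, so at the check the base is a NUMBER `p` the
invariant knows to be the base of an allocated block; the address checked is `p + 4 * idx` in whatever shape the stepper left it,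
hence the equation `ha`, which `omega` or `rfl` proves. `hidx` is where the closed forms of Walks.lean / Step3.lean go.
Two forms: over an ALLOCATED block (`hB : Blk ⟨p, sz⟩`, what every clause of the invariant gives), and `…_live` over a block the
worker knows to be LIVE from the shadow layer (the temp block `buf2`, a stack object). From the `Site`: `.acc hc`, `.acc_addr hc`
(for `rdi = addr a`), `.has hc hL`, `.inside hc`. -/

/-- **A 4-byte check site `p[idx]` in a LIVE block holding at least `len` floats** (the temp block `buf2` of `inverse_mdct`, a
stack object). -/
theorem site_f32_live {Live : Nat → Prop} {p sz len idx a : Nat} (hB : (Block.mk p sz).live Live) (hidx : idx < len)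
    (hlen : 4 * len ≤ sz) (ha : a = p + 4 * idx) : Site Live a 4 := by
  subst ha
  apply Site.of_block hB
  · exact Nat.le_add_right _ _
  · simp only []
    omega
  · omega

/-- **A 2-byte check site `p[idx]` in a LIVE block holding at least `len` `uint16`.** -/
theorem site_u16_live {Live : Nat → Prop} {p sz len idx a : Nat} (hB : (Block.mk p sz).live Live) (hidx : idx < len)
    (hlen : 2 * len ≤ sz) (ha : a = p + 2 * idx) : Site Live a 2 := by
  subst ha
  apply Site.of_block hB
  · exact Nat.le_add_right _ _
  · simp only []
    omega
  · omega

/-- **A 4-byte check site `p[idx]` in an ALLOCATED block holding at least `len` floats**: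
`have s := site_f32 hL hA (L1.AA hn ht hq) (by omega) (by omega)`, then `exact s.acc hc`. -/
theorem site_f32 {Live : Nat → Prop} {Blk : Block → Prop} (hL : BlkLive Blk Live) {p sz len idx a : Nat} (hB : Blk ⟨p, sz⟩)
    (hidx : idx < len) (hlen : 4 * len ≤ sz) (ha : a = p + 4 * idx) : Site Live a 4 :=
  site_f32_live (hL _ hB) hidx hlen ha

/-- **A 2-byte check site `p[idx]` in an ALLOCATED block holding at least `len` `uint16`** (the bit-reverse table). -/
theorem site_u16 {Live : Nat → Prop} {Blk : Block → Prop} (hL : BlkLive Blk Live) {p sz len idx a : Nat} (hB : Blk ⟨p, sz⟩)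
    (hidx : idx < len) (hlen : 2 * len ≤ sz) (ha : a = p + 2 * idx) : Site Live a 2 :=
  site_u16_live (hL _ hB) hidx hlen ha

/-- **A 4-byte check site inside a run of floats that walks DOWN** (the step-3 helpers): the `cnt` floats `top[-(cnt - 1) .. 0]`
(`top` = the byte address of element 0, e.g. `ee0`) are live bytes (the helper's precondition); the access is `top[-d]`,
`d < cnt`, at the address `a` with `a + 4 d = top`. `hd` is where `Iter0.e`, `RLoop.e`, `Ld654.z` go. -/
theorem site_f32_down {Live : Nat → Prop} {top cnt d a : Nat} (hI : InLive Live (top + 4 - 4 * cnt) (4 * cnt))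
    (hcnt : 4 * cnt ≤ top + 4) (hd : d < cnt) (ha : a + 4 * d = top) : Site Live a 4 :=
  Site.of_inLive (InLive.sub hI a 4 (by omega) (by omega)) (by omega)

/-! ### 1. HD3 restated over the block sizes as numbers

`bsize mem f b` (block size number `b`: `blocksize_0` for `b = 0`, `blocksize_1` otherwise), `bsize_zero`, `bsize_one` are in
Vorbis/Blocks.lean (`Vorbis.bsize`). -/

/-- **HD3 (= I5's M1), restated over `bsize`**: both block sizes are legal (`2 ^ k`, `6 ≤ k ≤ 13`) and `b0 ≤ b1`. A hypothesis of
this file's lemmas; the header clauses own it. -/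
structure HD3 (mem : Mem) (f : Nat) : Prop where
  /-- `blocksize_0` is a legal block size -/
  b0 : IsBlocksize (bsize mem f 0)
  /-- `blocksize_1` is a legal block size -/
  b1 : IsBlocksize (bsize mem f 1)
  /-- short blocks are not longer than long blocks -/
  le : bsize mem f 0 ≤ bsize mem f 1

/-- HD3 from its exponent form (INVARIANTS: `[f+152] = 2^a`, `[f+156] = 2^b`, `6 ≤ a ≤ b ≤ 13`). -/
theorem HD3.of_pow {mem : Mem} {f a b : Nat} (h0 : stb_vorbis.blocksize_0 mem f = ((2 ^ a : Nat) : Int))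
    (h1 : stb_vorbis.blocksize_1 mem f = ((2 ^ b : Nat) : Int)) (ha : 6 ≤ a) (hab : a ≤ b) (hb : b ≤ 13) : HD3 mem f := by
  have e0 : bsize mem f 0 = 2 ^ a := by
    rw [bsize_zero, h0]
    exact Int.toNat_natCast _
  have e1 : bsize mem f 1 = 2 ^ b := by
    rw [bsize_one, h1]
    exact Int.toNat_natCast _
  refine ⟨?_, ?_, ?_⟩
  · rw [e0]
    exact (ld_pow a ha (by omega)).isBlocksize
  · rw [e1]
    exact (ld_pow b (by omega) hb).isBlocksize
  · rw [e0, e1]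
    exact Nat.pow_le_pow_right (by decide) hab

/-- Either size is legal. -/
theorem HD3.size {mem : Mem} {f : Nat} (h : HD3 mem f) (b : Nat) : IsBlocksize (bsize mem f b) := by
  by_cases hb : b = 0
  · subst hb
    exact h.b0
  · have e : bsize mem f b = bsize mem f 1 := by
      unfold bsize
      rw [if_neg hb, if_neg (by decide : ¬ (1 = 0))]
    rw [e]
    exact h.b1

/-- Either size is at most `b1` (so `n` floats of a frame fit the `b1` floats of a channel buffer). -/
theorem HD3.le_b1 {mem : Mem} {f : Nat} (h : HD3 mem f) (b : Nat) : bsize mem f b ≤ bsize mem f 1 := by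
  by_cases hb : b = 0
  · subst hb
    exact h.le
  · have e : bsize mem f b = bsize mem f 1 := by
      unfold bsize
      rw [if_neg hb, if_neg (by decide : ¬ (1 = 0))]
    rw [e]
    exact Nat.le_refl _

/-- The `int` field `blocksize_0` IS the number `bsize mem f 0` (it is positive). -/
theorem HD3.blocksize_0_eq {mem : Mem} {f : Nat} (h : HD3 mem f) :
    stb_vorbis.blocksize_0 mem f = (bsize mem f 0 : Int) := by
  have h1 := h.b0.facts
  rw [bsize_zero] at h1 ⊢
  omega

/-- The `int` field `blocksize_1` IS the number `bsize mem f 1`. -/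
theorem HD3.blocksize_1_eq {mem : Mem} {f : Nat} (h : HD3 mem f) :
    stb_vorbis.blocksize_1 mem f = (bsize mem f 1 : Int) := by
  have h1 := h.b1.facts
  rw [bsize_one] at h1 ⊢
  omega

/-- **HD3 follows the two size fields** (it reads nothing else): the base form of `HD3.frame` / `HD3.transfer`. -/
theorem HD3.congr {mem mem' : Mem} {p f : Nat} (h : HD3 mem p)
    (e0 : stb_vorbis.blocksize_0 mem' f = stb_vorbis.blocksize_0 mem p)
    (e1 : stb_vorbis.blocksize_1 mem' f = stb_vorbis.blocksize_1 mem p) : HD3 mem' f := by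
  have eb := bsize_congr e0 e1
  refine ⟨?_, ?_, ?_⟩
  · rw [eb]
    exact h.b0
  · rw [eb]
    exact h.b1
  · rw [eb, eb]
    exact h.le

/-! ### 2. The clauses -/

/-- **M3 for one index `b`**, with `n` the block size number `b`: the five tables `init_blocksize(f, b, n)` allocates, each the
allocated block of EXACTLY the stated size. `A[b]`, `B[b]`, `window[b]`: `n / 2` floats (`2 n` bytes); `C[b]`: `n / 4` floats
(`n` bytes); `bit_reverse[b]`: `n / 8` `uint16` (`n / 4` bytes). Never written after `init_blocksize` returns. -/
structure Tables (Blk : Block → Prop) (mem : Mem) (f b n : Nat) : Prop where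
  /-- `Block(A[b], 2 n)` -/
  A : Blk ⟨stb_vorbis.A mem f b, 2 * n⟩
  /-- `Block(B[b], 2 n)` -/
  B : Blk ⟨stb_vorbis.B mem f b, 2 * n⟩
  /-- `Block(C[b], n)` -/
  C : Blk ⟨stb_vorbis.C mem f b, n⟩
  /-- `Block(window[b], 2 n)` -/
  window : Blk ⟨stb_vorbis.window mem f b, 2 * n⟩
  /-- `Block(bit_reverse[b], n / 4)` -/
  bit_reverse : Blk ⟨stb_vorbis.bit_reverse mem f b, n / 4⟩

/-- **M4 for one table**: `∀ i < n / 8, R[i] ≤ n / 2 - 4` (`uint16` at `R + 2 i`). Stated for the table's base as a NUMBER `R`,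
because `inverse_mdct` loads the pointer once and then relies on the content while it stores to `buf2`. -/
def RevOK (mem : Mem) (R n : Nat) : Prop := ∀ i, i < n / 8 → mem.u16 (R + 2 * i) ≤ n / 2 - 4

/-- **M7**: `-b1 ≤ previous_length ≤ b1 / 2` (the field `BuffersOK.M7` has this type). -/
def M7Range (mem : Mem) (f : Nat) : Prop :=
  -(bsize mem f 1 : Int) ≤ stb_vorbis.previous_length mem f ∧
    stb_vorbis.previous_length mem f ≤ ((bsize mem f 1 / 2 : Nat) : Int)

/-- **The group `MdctOK`: M2, M3, M4 of INVARIANTS §3.6.** Holds from SD.11 (after the two `init_blocksize` and the stores of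
`blocksize[]`) to the end of the run; nothing it reads is written after `start_decoder`. -/
structure MdctOK (Blk : Block → Prop) (mem : Mem) (f : Nat) : Prop where
  /-- M2: `blocksize[0] = b0`, `blocksize[1] = b1` -/
  M2 : ∀ b, b < 2 → stb_vorbis.blocksize mem f b = (bsize mem f b : Int)
  /-- M3: the five tables of either block size are allocated blocks of the stated sizes -/
  M3 : ∀ b, b < 2 → Tables Blk mem f b (bsize mem f b)
  /-- M4 (CONTENT): every entry of either bit-reverse table is at most `N / 2 - 4` -/
  M4 : ∀ b, b < 2 → RevOK mem (stb_vorbis.bit_reverse mem f b) (bsize mem f b)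

/-- **M6**: for every channel `i < channels`, `channel_buffers[i]` is the allocated block of `b1` floats (`4 b1` bytes:
`sizeof(float) * f->blocksize_1`) and `previous_window[i]` the one of `b1 / 2` floats (`2 b1` bytes:
`sizeof(float) * f->blocksize_1 / 2`). About the CONTENTS of these blocks nothing is said. -/
def M6OK (Blk : Block → Prop) (mem : Mem) (f : Nat) : Prop :=
  ∀ i : Nat, (i : Int) < stb_vorbis.channels mem f →
    Blk ⟨stb_vorbis.channel_buffers mem f i, 4 * bsize mem f 1⟩ ∧ Blk ⟨stb_vorbis.previous_window mem f i, 2 * bsize mem f 1⟩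

/-- **The group `BuffersOK`: M6 and M7 of INVARIANTS §3.6.** Holds from SD.10 (after the channel loop of `start_decoder`) to
the end of the run. M6 is never written after `start_decoder`; M7's field `previous_length` is stored by vorbis_finish_frame
(so decode-time code carries the group with `BuffersOK.transfer_m6`). -/
structure BuffersOK (Blk : Block → Prop) (mem : Mem) (f : Nat) : Prop where
  /-- M6: the two sample blocks of every channel -/
  M6 : M6OK Blk mem f
  /-- M7: `-b1 ≤ previous_length ≤ b1 / 2` -/
  M7 : M7Range mem f

/-! ### 3. USE: from a clause to the check site it justifies

Every `site_…` lemma: `hL : BlkLive Blk Live` first, the clause, the index bound, then the free address `a` with `ha` LAST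
(`rfl` for the accessor shape; `by simp only [vacc, voff]` / `omega` for the stepper's shape). -/

/-- M2 for the caller of `inverse_mdct` (`n = f->blocksize[m->blockflag]`, `blockflag ≤ 1` by MD2): the `int` read is the
legal block size number `b`; it is at most `b1`. -/
theorem MdctOK.blocksize_eq {Blk : Block → Prop} {mem : Mem} {f b : Nat} (h : MdctOK Blk mem f) (hd : HD3 mem f) (hb : b < 2) :
    stb_vorbis.blocksize mem f b = (bsize mem f b : Int) ∧ IsBlocksize (bsize mem f b) ∧ bsize mem f b ≤ bsize mem f 1 :=
  ⟨h.M2 b hb, hd.size b, hd.le_b1 b⟩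

/-- M3: `__asan_load4(&A[b][i])`, `i < n / 2`; accessor shape `mem.u64 (f + 1400 + 8 * b) + 4 * i`. -/
theorem Tables.site_A {Live : Nat → Prop} {Blk : Block → Prop} {mem : Mem} {f b n i : Nat} (hL : BlkLive Blk Live)
    (h : Tables Blk mem f b n) (hi : i < n / 2) {a : Nat} (ha : a = stb_vorbis.A_at mem f b i) : Site Live a 4 :=
  site_f32 hL h.A hi (by omega) ha

/-- M3: `__asan_load4(&B[b][i])`, `i < n / 2`. -/
theorem Tables.site_B {Live : Nat → Prop} {Blk : Block → Prop} {mem : Mem} {f b n i : Nat} (hL : BlkLive Blk Live)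
    (h : Tables Blk mem f b n) (hi : i < n / 2) {a : Nat} (ha : a = stb_vorbis.B_at mem f b i) : Site Live a 4 :=
  site_f32 hL h.B hi (by omega) ha

/-- M3: `__asan_load4(&C[b][i])`, `i < n / 4`. -/
theorem Tables.site_C {Live : Nat → Prop} {Blk : Block → Prop} {mem : Mem} {f b n i : Nat} (hL : BlkLive Blk Live)
    (h : Tables Blk mem f b n) (hi : i < n / 4) {a : Nat} (ha : a = stb_vorbis.C_at mem f b i) : Site Live a 4 :=
  site_f32 hL h.C hi (by omega) ha

/-- M3: `__asan_load4(&window[b][i])`, `i < n / 2` (vorbis_finish_frame, through `get_window`'s result). -/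
theorem Tables.site_window {Live : Nat → Prop} {Blk : Block → Prop} {mem : Mem} {f b n i : Nat} (hL : BlkLive Blk Live)
    (h : Tables Blk mem f b n) (hi : i < n / 2) {a : Nat} (ha : a = stb_vorbis.window_at mem f b i) : Site Live a 4 :=
  site_f32 hL h.window hi (by omega) ha

/-- M3: `__asan_load2(&bit_reverse[b][i])`, `i < n / 8`. -/
theorem Tables.site_bit_reverse {Live : Nat → Prop} {Blk : Block → Prop} {mem : Mem} {f b n i : Nat} (hL : BlkLive Blk Live)
    (h : Tables Blk mem f b n) (hi : i < n / 8) {a : Nat} (ha : a = stb_vorbis.bit_reverse_at mem f b i) : Site Live a 2 :=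
  site_u16 hL h.bit_reverse hi (by omega) ha

/-- The five table pointers are not NULL and the tables lie in the data space (every allocated block does: `BlkOK.inside`). -/
theorem Tables.inside {Blk : Block → Prop} {mem : Mem} {f b n : Nat} (h : Tables Blk mem f b n) (hok : BlkOK Blk) :
    0x100000 ≤ stb_vorbis.A mem f b ∧ stb_vorbis.A mem f b + 2 * n ≤ 0xC00000 ∧
    0x100000 ≤ stb_vorbis.B mem f b ∧ stb_vorbis.B mem f b + 2 * n ≤ 0xC00000 ∧
    0x100000 ≤ stb_vorbis.C mem f b ∧ stb_vorbis.C mem f b + n ≤ 0xC00000 ∧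
    0x100000 ≤ stb_vorbis.window mem f b ∧ stb_vorbis.window mem f b + 2 * n ≤ 0xC00000 ∧
    0x100000 ≤ stb_vorbis.bit_reverse mem f b ∧ stb_vorbis.bit_reverse mem f b + n / 4 ≤ 0xC00000 := by
  have h1 := hok.inside _ h.A
  have h2 := hok.inside _ h.B
  have h3 := hok.inside _ h.C
  have h4 := hok.inside _ h.window
  have h5 := hok.inside _ h.bit_reverse
  simp only [] at h1 h2 h3 h4 h5
  omega

/-- **M4 at its use** (inverse_mdct 2822–2832): the entry `k4 = R[i]` read as a zero-extended `uint16` indexes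
`u[k4 .. k4 + 3]` inside the first `n / 2` floats of the buffer. (A VALUE fact: stays as it is.) -/
theorem RevOK.k4 {mem : Mem} {R n i q : Nat} (h : RevOK mem R n) (hn : IsBlocksize n) (hi : i < n / 8) (hq : q ≤ 3) :
    mem.u16 (R + 2 * i) + q < n / 2 :=
  S456.u hn (h i hi) hq

/-- **The check site `__asan_load4(u + 4 * k4 + 4 * q)` of steps 4-5-6**, in one step: table entry `i = 2 t + j` of iteration
`t`. The block `u` is the temp block `buf2` or a channel buffer, so it is given as a LIVE block (for a channel buffer:
`hu := hL _ (h6 c hch).1`). -/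
theorem RevOK.site_u {Live : Nat → Prop} {mem : Mem} {R n u sz t j q : Nat} (h : RevOK mem R n) (hn : IsBlocksize n)
    (hu : (Block.mk u sz).live Live) (hsz : 2 * n ≤ sz) (ht : t < n / 16) (hj : j ≤ 1) (hq : q ≤ 3) {a : Nat}
    (ha : a = u + 4 * (mem.u16 (R + 2 * (2 * t + j)) + q)) : Site Live a 4 :=
  site_f32_live hu (h.k4 hn (S456.rev hn ht hj) hq) (by omega) ha

/-- M6 at its use: `channel_buffers[c][i]`, `i < b1`; accessor shape `mem.u64 (f + 872 + 8 * c) + 4 * i`. -/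
theorem M6OK.site_channel_buffer {Live : Nat → Prop} {Blk : Block → Prop} {mem : Mem} {f c i : Nat} (hL : BlkLive Blk Live)
    (h : M6OK Blk mem f) (hch : (c : Int) < stb_vorbis.channels mem f) (hi : i < bsize mem f 1) {a : Nat}
    (ha : a = stb_vorbis.channel_buffers_at mem f c i) : Site Live a 4 :=
  site_f32 hL (h c hch).1 hi (Nat.le_refl _) ha

/-- M6 at its use: `previous_window[c][i]`, `i < b1 / 2`. -/
theorem M6OK.site_previous_window {Live : Nat → Prop} {Blk : Block → Prop} {mem : Mem} {f c i : Nat} (hL : BlkLive Blk Live)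
    (h : M6OK Blk mem f) (hch : (c : Int) < stb_vorbis.channels mem f) (hi : i < bsize mem f 1 / 2) {a : Nat}
    (ha : a = stb_vorbis.previous_window_at mem f c i) : Site Live a 4 :=
  site_f32 hL (h c hch).2 hi (by omega) ha

/-- M6 for the caller of `inverse_mdct`: the channel buffer is an allocated block that holds the `n` floats of a frame of
either size (`4 n ≤ 4 b1`). -/
theorem M6OK.buffer_of_frame {Blk : Block → Prop} {mem : Mem} {f c b : Nat} (h : M6OK Blk mem f) (hd : HD3 mem f)
    (hch : (c : Int) < stb_vorbis.channels mem f) :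
    Blk ⟨stb_vorbis.channel_buffers mem f c, 4 * bsize mem f 1⟩ ∧ 4 * bsize mem f b ≤ 4 * bsize mem f 1 := by
  have := hd.le_b1 b
  exact ⟨(h c hch).1, by omega⟩

/-- **M7 at its use (get_window)**: the machine compares `t = (len + len) mod 2 ^ 32` with a block size `b ≤ 8192`; with
`len = previous_length` in M7's range the doubling does not wrap, so `t = b` says `2 len = b`: a non-NULL window means
`previous_length ∈ {b0 / 2, b1 / 2}` and the window returned has exactly `previous_length` floats. -/
theorem get_window_arith {len : Int} {b1 b : Nat} (h1 : -(b1 : Int) ≤ len) (h2 : len ≤ ((b1 / 2 : Nat) : Int))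
    (hb1 : b1 ≤ 8192) (hb : b ≤ 8192) : ((len + len) % 4294967296).toNat = b ↔ 2 * len = (b : Int) := by
  omega

/-- The window `get_window` returns for `len` with `2 len = b_k`: the allocated block of exactly `len` floats. -/
theorem MdctOK.window_of_len {Blk : Block → Prop} {mem : Mem} {f k : Nat} {len : Int} (h : MdctOK Blk mem f) (hk : k < 2)
    (hl : 2 * len = (bsize mem f k : Int)) : Blk ⟨stb_vorbis.window mem f k, 4 * len.toNat⟩ := by
  have e : 4 * len.toNat = 2 * bsize mem f k := by omega
  rw [e]
  exact (h.M3 k hk).window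

/-! ### 4. FRAME: the clauses follow the object and survive what does not touch what they read

Per group ONE two-address lemma `P.transfer` (Vorbis/Blocks.lean §5): the windows `P.wins` of the object at `f` in `mem'` read as
those of the object at `p` in `mem` (`ObjEq`), the blocks `P.Reads` whose content the group reads are `Kept`, the blocks `P.Owns`
of its SHAPE clauses are still allocated. FRAME is the instance `p = f` (`hs.sub (by decide)` from `ObjSame` / `DecodeSame`),
TRANSPORT the instance `ObjEq.of_copied`, a change of the block predicate alone is `P.reblk`.

    group        wins                                               Reads                      Owns
    MdctOK       [144,160) [1400,1480)                              the two bit-reverse tables the ten tables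
    M6OK         [4,8) [156,160) [872,1000) [1128,1256)             —                          two blocks per channel
    M7Range      [156,160) [1256,1260)                              —                          —
    BuffersOK    [4,8) [156,160) [872,1000) [1128,1260)             —                          = M6OK.Owns

The finer forms the segments of `start_decoder` and `inverse_mdct` use are kept: `P.congr` (from the equations of the fields,
the base of everything else), `ReadsEq` / `ReadsSame` (all the field equations in one structure, from `ObjEq` or from the
windows `windows f` as blocks), `MdctOK.frame'` (M4 given in the new memory), `RevOK.frame / of_writeLE`, `Tables.congr / frame`,
`HD3.frame`, `…frame_windows` (the windows of `*f` as `Block.Same`). None mentions the live set or `Covers`. -/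

/-! #### The windows, the content blocks, the owned blocks -/

/-- The windows of `*f` that M2, M3, M4 read: `blocksize[2]`, `blocksize_0`, `blocksize_1`; `A[2]`, `B[2]`, `C[2]`, `window[2]`,
`bit_reverse[2]`. -/
def MdctOK.wins : Wins := [(144, 160), (1400, 1480)]

/-- `MdctOK.wins` in field names: a layout change fails here. -/
example : MdctOK.wins = [(Off.stb_vorbis.blocksize, Off.stb_vorbis.blocksize_1 + 4),
    (Off.stb_vorbis.A, Off.stb_vorbis.bit_reverse + 16)] := by decide

/-- The windows of `*f` that M6 reads: `channels`; `blocksize_1`; `channel_buffers[16]`; `previous_window[16]`. -/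
def M6OK.wins : Wins := [(4, 8), (156, 160), (872, 1000), (1128, 1256)]

/-- `M6OK.wins` in field names. -/
example : M6OK.wins = [(Off.stb_vorbis.channels, Off.stb_vorbis.channels + 4),
    (Off.stb_vorbis.blocksize_1, Off.stb_vorbis.blocksize_1 + 4),
    (Off.stb_vorbis.channel_buffers, Off.stb_vorbis.channel_buffers + 128),
    (Off.stb_vorbis.previous_window, Off.stb_vorbis.previous_window + 128)] := by decide

/-- The windows of `*f` that M7 reads: `blocksize_1`; `previous_length`. -/
def M7Range.wins : Wins := [(156, 160), (1256, 1260)]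

/-- `M7Range.wins` in field names. -/
example : M7Range.wins = [(Off.stb_vorbis.blocksize_1, Off.stb_vorbis.blocksize_1 + 4),
    (Off.stb_vorbis.previous_length, Off.stb_vorbis.previous_length + 4)] := by decide

/-- The windows of `*f` that M6 and M7 read: `channels`; `blocksize_1`; `channel_buffers[16]`; `previous_window[16]` and
`previous_length` (adjacent). -/
def BuffersOK.wins : Wins := [(4, 8), (156, 160), (872, 1000), (1128, 1260)]

/-- `BuffersOK.wins` in field names. -/
example : BuffersOK.wins = [(Off.stb_vorbis.channels, Off.stb_vorbis.channels + 4),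
    (Off.stb_vorbis.blocksize_1, Off.stb_vorbis.blocksize_1 + 4),
    (Off.stb_vorbis.channel_buffers, Off.stb_vorbis.channel_buffers + 128),
    (Off.stb_vorbis.previous_window, Off.stb_vorbis.previous_length + 4)] := by decide

/-- The windows of `*f` that `Mdct.HD3` reads: `blocksize_0`, `blocksize_1`. -/
def HD3.wins : Wins := [(152, 160)]

/-- `HD3.wins` in field names. -/
example : HD3.wins = [(Off.stb_vorbis.blocksize_0, Off.stb_vorbis.blocksize_1 + 4)] := by decide

/-- **The blocks whose CONTENT `MdctOK` reads** (M4): the two bit-reverse tables. -/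
inductive MdctOK.Reads (mem : Mem) (f : Nat) : Block → Prop
  /-- `bit_reverse[b]`, `n / 4` bytes -/
  | bit_reverse (b : Nat) (hb : b < 2) : MdctOK.Reads mem f ⟨stb_vorbis.bit_reverse mem f b, bsize mem f b / 4⟩

/-- **The blocks the SHAPE clauses of `MdctOK` mention** (M3): the ten tables. -/
inductive MdctOK.Owns (mem : Mem) (f : Nat) : Block → Prop
  /-- `A[b]`, `2 n` bytes -/
  | A (b : Nat) (hb : b < 2) : MdctOK.Owns mem f ⟨stb_vorbis.A mem f b, 2 * bsize mem f b⟩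
  /-- `B[b]`, `2 n` bytes -/
  | B (b : Nat) (hb : b < 2) : MdctOK.Owns mem f ⟨stb_vorbis.B mem f b, 2 * bsize mem f b⟩
  /-- `C[b]`, `n` bytes -/
  | C (b : Nat) (hb : b < 2) : MdctOK.Owns mem f ⟨stb_vorbis.C mem f b, bsize mem f b⟩
  /-- `window[b]`, `2 n` bytes -/
  | window (b : Nat) (hb : b < 2) : MdctOK.Owns mem f ⟨stb_vorbis.window mem f b, 2 * bsize mem f b⟩
  /-- `bit_reverse[b]`, `n / 4` bytes -/
  | bit_reverse (b : Nat) (hb : b < 2) : MdctOK.Owns mem f ⟨stb_vorbis.bit_reverse mem f b, bsize mem f b / 4⟩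

/-- **The blocks the SHAPE clause M6 mentions**: the channel buffer and the previous window of every channel `i < channels`. -/
inductive M6OK.Owns (mem : Mem) (f : Nat) : Block → Prop
  /-- `channel_buffers[i]`, `4 b1` bytes -/
  | channel_buffer (i : Nat) (hi : (i : Int) < stb_vorbis.channels mem f) :
      M6OK.Owns mem f ⟨stb_vorbis.channel_buffers mem f i, 4 * bsize mem f 1⟩
  /-- `previous_window[i]`, `2 b1` bytes -/
  | previous_window (i : Nat) (hi : (i : Int) < stb_vorbis.channels mem f) :
      M6OK.Owns mem f ⟨stb_vorbis.previous_window mem f i, 2 * bsize mem f 1⟩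

/-- The blocks `BuffersOK` owns are M6's (M7 is a FIELD clause). -/
abbrev BuffersOK.Owns (mem : Mem) (f : Nat) : Block → Prop := M6OK.Owns mem f

/-- A content block of `MdctOK` is one of its owned blocks. -/
theorem MdctOK.Reads.owns {mem : Mem} {f : Nat} {B : Block} (h : MdctOK.Reads mem f B) : MdctOK.Owns mem f B := by
  cases h with
  | bit_reverse b hb => exact MdctOK.Owns.bit_reverse b hb

/-- **Every owned block of `MdctOK` is allocated.** -/
theorem MdctOK.owns_blk {Blk : Block → Prop} {mem : Mem} {f : Nat} {B : Block} (h : MdctOK Blk mem f)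
    (hO : MdctOK.Owns mem f B) : Blk B := by
  cases hO with
  | A b hb => exact (h.M3 b hb).A
  | B b hb => exact (h.M3 b hb).B
  | C b hb => exact (h.M3 b hb).C
  | window b hb => exact (h.M3 b hb).window
  | bit_reverse b hb => exact (h.M3 b hb).bit_reverse

/-- **Every content block of `MdctOK` is allocated** (so `BlkOK` gives its no-wrap, `AllKept` its `Kept`). -/
theorem MdctOK.reads_blk {Blk : Block → Prop} {mem : Mem} {f : Nat} {B : Block} (h : MdctOK Blk mem f)
    (hR : MdctOK.Reads mem f B) : Blk B :=
  h.owns_blk hR.owns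

/-- **Every owned block of M6 is allocated.** -/
theorem M6OK.owns_blk {Blk : Block → Prop} {mem : Mem} {f : Nat} {B : Block} (h : M6OK Blk mem f)
    (hO : M6OK.Owns mem f B) : Blk B := by
  cases hO with
  | channel_buffer i hi => exact (h i hi).1
  | previous_window i hi => exact (h i hi).2

/-- **Every owned block of `BuffersOK` is allocated.** -/
theorem BuffersOK.owns_blk {Blk : Block → Prop} {mem : Mem} {f : Nat} {B : Block} (h : BuffersOK Blk mem f)
    (hO : BuffersOK.Owns mem f B) : Blk B :=
  h.M6.owns_blk hO

/-! #### `ReadsEq`: all the field equations in one structure -/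

/-- The windows of `*f` that M2, M3, M4, M6 read together (the union of `MdctOK.wins` and `M6OK.wins`): `channels`;
`blocksize[2]`, `blocksize_0`, `blocksize_1`; `channel_buffers[16]`; `previous_window[16]`; the five table arrays. Both
`ObjSame` and `DecodeSame` contain them. -/
def ReadsEq.wins : Wins := [(4, 8), (144, 160), (872, 1000), (1128, 1256), (1400, 1480)]

/-- **Every field M2, M3, M4, M6 read has in `(mem', f)` the value it has in `(mem, p)`** (`previous_length`, read by M7 only,
is not among them). What the finer frame lemmas (`HD3.frame`, `Tables.frame`, `MdctOK.frame'`) consume; produced by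
`ReadsEq.of_objEq` (from `ObjSame` / `DecodeSame` / a `Copied`) or `ReadsSame.of_windows` (from the windows as blocks). -/
structure ReadsEq (mem : Mem) (p : Nat) (mem' : Mem) (f : Nat) : Prop where
  /-- `channels` -/
  channels : stb_vorbis.channels mem' f = stb_vorbis.channels mem p
  /-- `blocksize[b]` -/
  blocksize : ∀ b, b < 2 → stb_vorbis.blocksize mem' f b = stb_vorbis.blocksize mem p b
  /-- `blocksize_0` -/
  blocksize_0 : stb_vorbis.blocksize_0 mem' f = stb_vorbis.blocksize_0 mem p
  /-- `blocksize_1` -/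
  blocksize_1 : stb_vorbis.blocksize_1 mem' f = stb_vorbis.blocksize_1 mem p
  /-- `channel_buffers[i]` -/
  channel_buffers : ∀ i, i < 16 → stb_vorbis.channel_buffers mem' f i = stb_vorbis.channel_buffers mem p i
  /-- `previous_window[i]` -/
  previous_window : ∀ i, i < 16 → stb_vorbis.previous_window mem' f i = stb_vorbis.previous_window mem p i
  /-- `A[b]` -/
  A : ∀ b, b < 2 → stb_vorbis.A mem' f b = stb_vorbis.A mem p b
  /-- `B[b]` -/
  B : ∀ b, b < 2 → stb_vorbis.B mem' f b = stb_vorbis.B mem p b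
  /-- `C[b]` -/
  C : ∀ b, b < 2 → stb_vorbis.C mem' f b = stb_vorbis.C mem p b
  /-- `window[b]` -/
  window : ∀ b, b < 2 → stb_vorbis.window mem' f b = stb_vorbis.window mem p b
  /-- `bit_reverse[b]` -/
  bit_reverse : ∀ b, b < 2 → stb_vorbis.bit_reverse mem' f b = stb_vorbis.bit_reverse mem p b

/-- **The same-address form** (`p = f`): every field M2, M3, M4, M6 read has the same value in `mem'`. -/
abbrev ReadsSame (mem mem' : Mem) (f : Nat) : Prop := ReadsEq mem f mem' f

/-- Nothing changed. -/
theorem ReadsEq.refl (mem : Mem) (f : Nat) : ReadsEq mem f mem f :=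
  ⟨rfl, fun _ _ => rfl, rfl, rfl, fun _ _ => rfl, fun _ _ => rfl, fun _ _ => rfl, fun _ _ => rfl, fun _ _ => rfl,
    fun _ _ => rfl, fun _ _ => rfl⟩

/-- **The field equations from `ObjEq`**: `ReadsEq.of_objEq (hs.sub (by decide))` for `hs : ObjSame f mem mem'` or
`DecodeSame f mem mem'`, `ReadsEq.of_objEq (ObjEq.of_copied hcp (by decide))` for a struct copy. -/
theorem ReadsEq.of_objEq {mem mem' : Mem} {p f : Nat} (he : ObjEq ReadsEq.wins mem p mem' f) : ReadsEq mem p mem' f := by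
  constructor
  · simp only [vacc, voff]
    exact he.i32 _ (by decide)
  · intro b hb
    simp only [vacc, voff]
    exact he.i32_elem 144 160 (by decide) _ _ (by omega) (by omega)
  · simp only [vacc, voff]
    exact he.i32 _ (by decide)
  · simp only [vacc, voff]
    exact he.i32 _ (by decide)
  · intro i hi
    simp only [vacc, voff]
    exact he.u64_elem 872 1000 (by decide) _ _ (by omega) (by omega)
  · intro i hi
    simp only [vacc, voff]
    exact he.u64_elem 1128 1256 (by decide) _ _ (by omega) (by omega)
  · intro b hb
    simp only [vacc, voff]
    exact he.u64_elem 1400 1480 (by decide) _ _ (by omega) (by omega)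
  · intro b hb
    simp only [vacc, voff]
    exact he.u64_elem 1400 1480 (by decide) _ _ (by omega) (by omega)
  · intro b hb
    simp only [vacc, voff]
    exact he.u64_elem 1400 1480 (by decide) _ _ (by omega) (by omega)
  · intro b hb
    simp only [vacc, voff]
    exact he.u64_elem 1400 1480 (by decide) _ _ (by omega) (by omega)
  · intro b hb
    simp only [vacc, voff]
    exact he.u64_elem 1400 1480 (by decide) _ _ (by omega) (by omega)

/-- `bsize` depends only on the two size fields. -/
theorem ReadsEq.bsize {mem mem' : Mem} {p f : Nat} (h : ReadsEq mem p mem' f) (b : Nat) : bsize mem' f b = bsize mem p b :=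
  bsize_congr h.blocksize_0 h.blocksize_1 b

/-! #### The windows of `*f` as blocks (the form some segments of `start_decoder` produce) -/

/-- The windows of `*f` that M2, M3, M4, M6 read, as blocks: `channels`, `blocksize[2]`, `blocksize_0`, `blocksize_1`,
`channel_buffers[16]`, `previous_window[16]`, `A[2]`, `B[2]`, `C[2]`, `window[2]`, `bit_reverse[2]`. (`previous_length`, read
by M7 only, is `plWindow`.) -/
def windows (f : Nat) : List Block :=
  [ ⟨f + Off.stb_vorbis.channels, 4⟩,
    ⟨f + Off.stb_vorbis.blocksize, 8⟩,
    ⟨f + Off.stb_vorbis.blocksize_0, 4⟩,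
    ⟨f + Off.stb_vorbis.blocksize_1, 4⟩,
    ⟨f + Off.stb_vorbis.channel_buffers, 128⟩,
    ⟨f + Off.stb_vorbis.previous_window, 128⟩,
    ⟨f + Off.stb_vorbis.A, 16⟩,
    ⟨f + Off.stb_vorbis.B, 16⟩,
    ⟨f + Off.stb_vorbis.C, 16⟩,
    ⟨f + Off.stb_vorbis.window, 16⟩,
    ⟨f + Off.stb_vorbis.bit_reverse, 16⟩ ]

/-- The window of `previous_length`, as a block. -/
def plWindow (f : Nat) : Block := ⟨f + Off.stb_vorbis.previous_length, 4⟩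

/-- The fields read the same when the windows do. -/
theorem ReadsSame.of_windows {mem mem' : Mem} {f : Nat} (hf : f + Off.sizeof.stb_vorbis ≤ 2 ^ 64)
    (hw : ∀ W, W ∈ windows f → W.Same mem mem') : ReadsSame mem mem' f := by
  have w1 := hw ⟨f + Off.stb_vorbis.channels, 4⟩ (by simp [windows])
  have w2 := hw ⟨f + Off.stb_vorbis.blocksize, 8⟩ (by simp [windows])
  have w3 := hw ⟨f + Off.stb_vorbis.blocksize_0, 4⟩ (by simp [windows])
  have w4 := hw ⟨f + Off.stb_vorbis.blocksize_1, 4⟩ (by simp [windows])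
  have w5 := hw ⟨f + Off.stb_vorbis.channel_buffers, 128⟩ (by simp [windows])
  have w6 := hw ⟨f + Off.stb_vorbis.previous_window, 128⟩ (by simp [windows])
  have w7 := hw ⟨f + Off.stb_vorbis.A, 16⟩ (by simp [windows])
  have w8 := hw ⟨f + Off.stb_vorbis.B, 16⟩ (by simp [windows])
  have w9 := hw ⟨f + Off.stb_vorbis.C, 16⟩ (by simp [windows])
  have w10 := hw ⟨f + Off.stb_vorbis.window, 16⟩ (by simp [windows])
  have w11 := hw ⟨f + Off.stb_vorbis.bit_reverse, 16⟩ (by simp [windows])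
  simp only [vblock, voff] at w1 w2 w3 w4 w5 w6 w7 w8 w9 w10 w11 hf
  constructor
  · simp only [vacc, voff]
    exact w1.i32 _ (by omega) (by omega) (by omega)
  · intro b hb
    simp only [vacc, voff]
    exact w2.i32 _ (by omega) (by omega) (by omega)
  · simp only [vacc, voff]
    exact w3.i32 _ (by omega) (by omega) (by omega)
  · simp only [vacc, voff]
    exact w4.i32 _ (by omega) (by omega) (by omega)
  · intro i hi
    simp only [vacc, voff]
    exact w5.u64 _ (by omega) (by omega) (by omega)
  · intro i hi
    simp only [vacc, voff]
    exact w6.u64 _ (by omega) (by omega) (by omega)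
  · intro b hb
    simp only [vacc, voff]
    exact w7.u64 _ (by omega) (by omega) (by omega)
  · intro b hb
    simp only [vacc, voff]
    exact w8.u64 _ (by omega) (by omega) (by omega)
  · intro b hb
    simp only [vacc, voff]
    exact w9.u64 _ (by omega) (by omega) (by omega)
  · intro b hb
    simp only [vacc, voff]
    exact w10.u64 _ (by omega) (by omega) (by omega)
  · intro b hb
    simp only [vacc, voff]
    exact w11.u64 _ (by omega) (by omega) (by omega)

/-- All windows lie inside `*f`: if the whole struct reads the same, so do they. -/
theorem windows_of_struct {mem mem' : Mem} {f : Nat} (h : (Block.mk f Off.sizeof.stb_vorbis).Same mem mem') :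
    (∀ W, W ∈ windows f → W.Same mem mem') ∧ (plWindow f).Same mem mem' := by
  simp only [vblock, voff] at h
  constructor
  · intro W hW
    simp only [windows, List.mem_cons, List.mem_nil_iff, or_false] at hW
    rcases hW with rfl | rfl | rfl | rfl | rfl | rfl | rfl | rfl | rfl | rfl | rfl <;>
    · simp only [vblock, voff]
      exact Mem.EqOn.mono h (by omega) (by omega)
  · simp only [plWindow, vblock, voff]
    exact Mem.EqOn.mono h (by omega) (by omega)

/-- **A store to a field of `*f` that is none of the windows** (`temp_offset`, `error`, `samples_output`, the bit reader's and
the pager's fields …: anything in `[f + lo, f + hi)` with the interval in one of the gaps between the windows) keeps them. The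
gaps, as offsets: `[8, 144)`, `[160, 872)`, `[1000, 1128)`, `[1260, 1400)`, `[1480, 1808)`. -/
theorem windows_of_store {mem : Mem} {f off k v : Nat} (hf : f + Off.sizeof.stb_vorbis ≤ 2 ^ 64)
    (hgap : (8 ≤ off ∧ off + k ≤ 144) ∨ (160 ≤ off ∧ off + k ≤ 872) ∨ (1000 ≤ off ∧ off + k ≤ 1128) ∨
      (1260 ≤ off ∧ off + k ≤ 1400) ∨ (1480 ≤ off ∧ off + k ≤ 1808)) :
    (∀ W, W ∈ windows f → W.Same mem (mem.writeLE (addr (f + off)) k v)) ∧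
      (plWindow f).Same mem (mem.writeLE (addr (f + off)) k v) := by
  simp only [voff] at hf
  have hs : ∀ W : Block, (W.base + W.size ≤ f + off ∨ f + off + k ≤ W.base) →
      W.Same mem (mem.writeLE (addr (f + off)) k v) := by
    intro W hW
    exact Block.Same.of_writeLE (C := ⟨f + off, k⟩) mem (f + off) k v hW ⟨Nat.le_refl _, Nat.le_refl _⟩
      (by simp only []; omega)
  constructor
  · intro W hW
    simp only [windows, List.mem_cons, List.mem_nil_iff, or_false] at hW
    rcases hW with rfl | rfl | rfl | rfl | rfl | rfl | rfl | rfl | rfl | rfl | rfl <;>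
    · apply hs
      simp only [voff]
      omega
  · apply hs
    simp only [plWindow, voff]
    omega

/-! #### HD3 -/

/-- HD3 follows the object (it reads only the two size fields): from the field equations. -/
theorem HD3.frame {mem mem' : Mem} {p f : Nat} (h : HD3 mem p) (hr : ReadsEq mem p mem' f) : HD3 mem' f :=
  h.congr hr.blocksize_0 hr.blocksize_1

/-- **The two-address frame lemma of `Mdct.HD3`**: the window `[152, 160)` of `*f`. -/
theorem HD3.transfer {mem mem' : Mem} {p f : Nat} (h : HD3 mem p) (he : ObjEq HD3.wins mem p mem' f) : HD3 mem' f := by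
  apply h.congr
  · simp only [vacc, voff]
    exact he.i32 _ (by decide)
  · simp only [vacc, voff]
    exact he.i32 _ (by decide)

/-! #### M3 for one index, M4 for one table -/

/-- **M3 for ONE index follows its own five pointer fields**, when no block was freed. This is the form `start_decoder` needs
between the two `init_blocksize` calls: the second call stores `A[1] … bit_reverse[1]` (which share their 16-byte windows with
`A[0] …`), and the tables of index 0 must be carried over it. -/
theorem Tables.congr {Blk Blk' : Block → Prop} {mem mem' : Mem} {p f b n : Nat} (h : Tables Blk mem p b n)
    (eA : stb_vorbis.A mem' f b = stb_vorbis.A mem p b) (eB : stb_vorbis.B mem' f b = stb_vorbis.B mem p b)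
    (eC : stb_vorbis.C mem' f b = stb_vorbis.C mem p b) (eW : stb_vorbis.window mem' f b = stb_vorbis.window mem p b)
    (eR : stb_vorbis.bit_reverse mem' f b = stb_vorbis.bit_reverse mem p b) (hB : ∀ B, Blk B → Blk' B) :
    Tables Blk' mem' f b n := by
  refine ⟨?_, ?_, ?_, ?_, ?_⟩
  · rw [eA]
    exact hB _ h.A
  · rw [eB]
    exact hB _ h.B
  · rw [eC]
    exact hB _ h.C
  · rw [eW]
    exact hB _ h.window
  · rw [eR]
    exact hB _ h.bit_reverse

/-- M3 for one index follows the object: all the fields read the same, no block was freed. -/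
theorem Tables.frame {Blk Blk' : Block → Prop} {mem mem' : Mem} {p f b n : Nat} (h : Tables Blk mem p b n)
    (hr : ReadsEq mem p mem' f) (hb : b < 2) (hB : ∀ B, Blk B → Blk' B) : Tables Blk' mem' f b n :=
  h.congr (hr.A b hb) (hr.B b hb) (hr.C b hb) (hr.window b hb) (hr.bit_reverse b hb) hB

/-- **M4 for one table survives** when the table's block is kept (every store of `inverse_mdct` goes to `buf2` or to the
channel buffer, disjoint from the table: SH3). -/
theorem RevOK.frame {mem mem' : Mem} {R n : Nat} (h : RevOK mem R n) (hk : (Block.mk R (n / 4)).Kept mem mem') :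
    RevOK mem' R n := by
  intro i hi
  have e : mem'.u16 (R + 2 * i) = mem.u16 (R + 2 * i) := by
    apply hk.u16
    · simp only []
      omega
    · simp only []
      omega
  rw [e]
  exact h i hi

/-- M4 for one table over ONE store of the walker inside a block `C` disjoint from the table. -/
theorem RevOK.of_writeLE {mem : Mem} {R n : Nat} (h : RevOK mem R n) {C : Block} (b k v : Nat)
    (hd : (Block.mk R (n / 4)).disjoint C) (hc : C.contains b k) (hC : C.base + C.size ≤ 2 ^ 64) (hR : R + n / 4 ≤ 2 ^ 64) :
    RevOK (mem.writeLE (addr b) k v) R n :=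
  h.frame (Block.Kept.of_writeLE mem b k v hd hc hC hR)

/-! #### M7 -/

/-- **M7 follows `blocksize_1` and `previous_length`**: the base form. -/
theorem M7Range.congr {mem mem' : Mem} {p f : Nat} (h : M7Range mem p)
    (e1 : stb_vorbis.blocksize_1 mem' f = stb_vorbis.blocksize_1 mem p)
    (el : stb_vorbis.previous_length mem' f = stb_vorbis.previous_length mem p) : M7Range mem' f := by
  unfold M7Range at *
  rw [bsize_one, e1, el, ← bsize_one]
  exact h

/-- **The two-address frame lemma of M7**: the windows `[156, 160)`, `[1256, 1260)` of `*f`. (Decode-time code STORES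
`previous_length`, so `DecodeSame` does not give them: there M7 is re-established by `M7Range.of_finish`.) -/
theorem M7Range.transfer {mem mem' : Mem} {p f : Nat} (h : M7Range mem p) (he : ObjEq M7Range.wins mem p mem' f) :
    M7Range mem' f := by
  apply h.congr
  · simp only [vacc, voff]
    exact he.i32 _ (by decide)
  · simp only [vacc, voff]
    exact he.i32 _ (by decide)

/-- FRAME of M7: what every allocator call leaves of `*f`. -/
theorem M7Range.frame {mem mem' : Mem} {f : Nat} (h : M7Range mem f) (hs : ObjSame f mem mem') : M7Range mem' f :=
  h.transfer (hs.sub (by decide))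

/-- FRAME of M7 from the windows as blocks: the size fields and `previous_length` read the same. -/
theorem M7Range.frame_windows {mem mem' : Mem} {f : Nat} (h : M7Range mem f) (hr : ReadsSame mem mem' f)
    (hp : (plWindow f).Same mem mem') (hf : f + Off.sizeof.stb_vorbis ≤ 2 ^ 64) : M7Range mem' f := by
  apply h.congr hr.blocksize_1
  simp only [plWindow, vblock, voff] at hp hf
  simp only [vacc, voff]
  exact hp.i32 _ (by omega) (by omega) (by omega)

/-! #### The group `MdctOK` -/

/-- **`MdctOK` from the equations of the fields it reads**, M4 given in the new memory, the ten tables still allocated: the base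
of `transfer`, `frame'`, `reblk`. (Workers use those.) -/
theorem MdctOK.congr {Blk Blk' : Block → Prop} {mem mem' : Mem} {p f : Nat} (h : MdctOK Blk mem p)
    (e2 : ∀ b, b < 2 → stb_vorbis.blocksize mem' f b = stb_vorbis.blocksize mem p b)
    (e0 : stb_vorbis.blocksize_0 mem' f = stb_vorbis.blocksize_0 mem p)
    (e1 : stb_vorbis.blocksize_1 mem' f = stb_vorbis.blocksize_1 mem p)
    (eA : ∀ b, b < 2 → stb_vorbis.A mem' f b = stb_vorbis.A mem p b)
    (eB : ∀ b, b < 2 → stb_vorbis.B mem' f b = stb_vorbis.B mem p b)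
    (eC : ∀ b, b < 2 → stb_vorbis.C mem' f b = stb_vorbis.C mem p b)
    (eW : ∀ b, b < 2 → stb_vorbis.window mem' f b = stb_vorbis.window mem p b)
    (eR : ∀ b, b < 2 → stb_vorbis.bit_reverse mem' f b = stb_vorbis.bit_reverse mem p b)
    (hR : ∀ b, b < 2 → RevOK mem' (stb_vorbis.bit_reverse mem p b) (bsize mem p b))
    (hB : ∀ B, MdctOK.Owns mem p B → Blk B → Blk' B) : MdctOK Blk' mem' f := by
  have eb := bsize_congr e0 e1
  refine ⟨?_, ?_, ?_⟩
  · intro b hb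
    rw [e2 b hb, eb]
    exact h.M2 b hb
  · intro b hb
    have t := h.M3 b hb
    rw [eb]
    refine ⟨?_, ?_, ?_, ?_, ?_⟩
    · rw [eA b hb]
      exact hB _ (MdctOK.Owns.A b hb) t.A
    · rw [eB b hb]
      exact hB _ (MdctOK.Owns.B b hb) t.B
    · rw [eC b hb]
      exact hB _ (MdctOK.Owns.C b hb) t.C
    · rw [eW b hb]
      exact hB _ (MdctOK.Owns.window b hb) t.window
    · rw [eR b hb]
      exact hB _ (MdctOK.Owns.bit_reverse b hb) t.bit_reverse
  · intro b hb
    rw [eR b hb, eb]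
    exact hR b hb

/-- **THE two-address frame lemma of `MdctOK`** (M2, M3, M4): the windows `[144, 160)`, `[1400, 1480)` of the object at `f` in
`mem'` read as those of the object at `p` in `mem`, the two bit-reverse tables are kept, the ten tables are still allocated. -/
theorem MdctOK.transfer {Blk Blk' : Block → Prop} {mem mem' : Mem} {p f : Nat} (h : MdctOK Blk mem p)
    (he : ObjEq MdctOK.wins mem p mem' f) (hk : ∀ B, MdctOK.Reads mem p B → B.Kept mem mem')
    (hB : ∀ B, MdctOK.Owns mem p B → Blk B → Blk' B) : MdctOK Blk' mem' f := by
  have e2 : ∀ b, b < 2 → stb_vorbis.blocksize mem' f b = stb_vorbis.blocksize mem p b := by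
    intro b hb
    simp only [vacc, voff]
    exact he.i32_elem 144 160 (by decide) _ _ (by omega) (by omega)
  have e0 : stb_vorbis.blocksize_0 mem' f = stb_vorbis.blocksize_0 mem p := by
    simp only [vacc, voff]
    exact he.i32 _ (by decide)
  have e1 : stb_vorbis.blocksize_1 mem' f = stb_vorbis.blocksize_1 mem p := by
    simp only [vacc, voff]
    exact he.i32 _ (by decide)
  have eA : ∀ b, b < 2 → stb_vorbis.A mem' f b = stb_vorbis.A mem p b := by
    intro b hb
    simp only [vacc, voff]
    exact he.u64_elem 1400 1480 (by decide) _ _ (by omega) (by omega)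
  have eB : ∀ b, b < 2 → stb_vorbis.B mem' f b = stb_vorbis.B mem p b := by
    intro b hb
    simp only [vacc, voff]
    exact he.u64_elem 1400 1480 (by decide) _ _ (by omega) (by omega)
  have eC : ∀ b, b < 2 → stb_vorbis.C mem' f b = stb_vorbis.C mem p b := by
    intro b hb
    simp only [vacc, voff]
    exact he.u64_elem 1400 1480 (by decide) _ _ (by omega) (by omega)
  have eW : ∀ b, b < 2 → stb_vorbis.window mem' f b = stb_vorbis.window mem p b := by
    intro b hb
    simp only [vacc, voff]
    exact he.u64_elem 1400 1480 (by decide) _ _ (by omega) (by omega)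
  have eR : ∀ b, b < 2 → stb_vorbis.bit_reverse mem' f b = stb_vorbis.bit_reverse mem p b := by
    intro b hb
    simp only [vacc, voff]
    exact he.u64_elem 1400 1480 (by decide) _ _ (by omega) (by omega)
  apply h.congr e2 e0 e1 eA eB eC eW eR _ hB
  intro b hb
  exact (h.M4 b hb).frame (hk _ (MdctOK.Reads.bit_reverse b hb))

/-- **FRAME of `MdctOK`**: same address, `ObjSame` (what every allocator call leaves of `*f`), the two bit-reverse tables kept.
(From `hd : DecodeSame f mem mem'` write `h.transfer (hd.sub (by decide)) hk (fun _ _ hb => hb)`.) -/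
theorem MdctOK.frame {Blk : Block → Prop} {mem mem' : Mem} {f : Nat} (h : MdctOK Blk mem f) (hs : ObjSame f mem mem')
    (hk : ∀ B, MdctOK.Reads mem f B → B.Kept mem mem') : MdctOK Blk mem' f :=
  h.transfer (hs.sub (by decide)) hk (fun _ _ hb => hb)

/-- **The frame lemma with M4 given in the new memory** (inside `inverse_mdct`, where M4 of the table in use is carried store by
store with `RevOK.of_writeLE`): the fields read the same (`ReadsEq.of_objEq`, `ReadsSame.of_windows`), M4 holds in `mem'`. -/
theorem MdctOK.frame' {Blk Blk' : Block → Prop} {mem mem' : Mem} {p f : Nat} (h : MdctOK Blk mem p)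
    (hr : ReadsEq mem p mem' f) (hR : ∀ b, b < 2 → RevOK mem' (stb_vorbis.bit_reverse mem p b) (bsize mem p b))
    (hB : ∀ B, MdctOK.Owns mem p B → Blk B → Blk' B) : MdctOK Blk' mem' f :=
  h.congr hr.blocksize hr.blocksize_0 hr.blocksize_1 hr.A hr.B hr.C hr.window hr.bit_reverse hR hB

/-- **FRAME of `MdctOK` from the windows of `*f` as blocks** (`windows f` read the same: `windows_of_struct`,
`windows_of_store`), the two bit-reverse tables kept, the ten tables still allocated. -/
theorem MdctOK.frame_windows {Blk Blk' : Block → Prop} {mem mem' : Mem} {f : Nat} (h : MdctOK Blk mem f)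
    (hf : f + Off.sizeof.stb_vorbis ≤ 2 ^ 64) (hw : ∀ W, W ∈ windows f → W.Same mem mem')
    (hk : ∀ B, MdctOK.Reads mem f B → B.Kept mem mem') (hB : ∀ B, MdctOK.Owns mem f B → Blk B → Blk' B) :
    MdctOK Blk' mem' f := by
  apply h.frame' (ReadsSame.of_windows hf hw) _ hB
  intro b hb
  exact (h.M4 b hb).frame (hk _ (MdctOK.Reads.bit_reverse b hb))

/-- **A change of the block predicate alone** (a temp block was freed, a block was allocated, a frame popped): the ten tables
are still allocated. -/
theorem MdctOK.reblk {Blk Blk' : Block → Prop} {mem : Mem} {f : Nat} (h : MdctOK Blk mem f)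
    (hB : ∀ B, MdctOK.Owns mem f B → Blk B → Blk' B) : MdctOK Blk' mem f :=
  h.frame' (ReadsEq.refl mem f) h.M4 hB

/-! #### M6 and the group `BuffersOK` -/

/-- **M6 from the equations of the fields it reads** (the pointer slots of the channels below `channels` only), the blocks still
allocated: the base of `transfer`, `reblk`. -/
theorem M6OK.congr {Blk Blk' : Block → Prop} {mem mem' : Mem} {p f : Nat} (h : M6OK Blk mem p)
    (ech : stb_vorbis.channels mem' f = stb_vorbis.channels mem p)
    (e1 : stb_vorbis.blocksize_1 mem' f = stb_vorbis.blocksize_1 mem p)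
    (ecb : ∀ i : Nat, (i : Int) < stb_vorbis.channels mem p →
      stb_vorbis.channel_buffers mem' f i = stb_vorbis.channel_buffers mem p i)
    (epw : ∀ i : Nat, (i : Int) < stb_vorbis.channels mem p →
      stb_vorbis.previous_window mem' f i = stb_vorbis.previous_window mem p i)
    (hB : ∀ B, M6OK.Owns mem p B → Blk B → Blk' B) : M6OK Blk' mem' f := by
  have eb : bsize mem' f 1 = bsize mem p 1 := by
    rw [bsize_one, bsize_one, e1]
  intro i hi
  rw [ech] at hi
  rw [ecb i hi, epw i hi, eb]
  exact ⟨hB _ (M6OK.Owns.channel_buffer i hi) (h i hi).1, hB _ (M6OK.Owns.previous_window i hi) (h i hi).2⟩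

/-- **THE two-address frame lemma of M6**: the windows `[4, 8)`, `[156, 160)`, `[872, 1000)`, `[1128, 1256)` of `*f`, the two
blocks of every channel still allocated. No content block: the CONTENTS of the sample buffers are free. `hC` is HD1's upper
half (the 16-entry pointer arrays are read for `i < channels` only). -/
theorem M6OK.transfer {Blk Blk' : Block → Prop} {mem mem' : Mem} {p f : Nat} (h : M6OK Blk mem p)
    (he : ObjEq M6OK.wins mem p mem' f) (hC : stb_vorbis.channels mem p ≤ 16)
    (hB : ∀ B, M6OK.Owns mem p B → Blk B → Blk' B) : M6OK Blk' mem' f := by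
  have ech : stb_vorbis.channels mem' f = stb_vorbis.channels mem p := by
    simp only [vacc, voff]
    exact he.i32 _ (by decide)
  have e1 : stb_vorbis.blocksize_1 mem' f = stb_vorbis.blocksize_1 mem p := by
    simp only [vacc, voff]
    exact he.i32 _ (by decide)
  have ecb : ∀ i : Nat, (i : Int) < stb_vorbis.channels mem p →
      stb_vorbis.channel_buffers mem' f i = stb_vorbis.channel_buffers mem p i := by
    intro i hi
    have hi16 : i < 16 := by omega
    simp only [vacc, voff]
    exact he.u64_elem 872 1000 (by decide) _ _ (by omega) (by omega)
  have epw : ∀ i : Nat, (i : Int) < stb_vorbis.channels mem p →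
      stb_vorbis.previous_window mem' f i = stb_vorbis.previous_window mem p i := by
    intro i hi
    have hi16 : i < 16 := by omega
    simp only [vacc, voff]
    exact he.u64_elem 1128 1256 (by decide) _ _ (by omega) (by omega)
  exact h.congr ech e1 ecb epw hB

/-- FRAME of M6: same address, `ObjSame`. (From `DecodeSame`: `h.transfer (hd.sub (by decide)) hC (fun _ _ hb => hb)`.) -/
theorem M6OK.frame {Blk : Block → Prop} {mem mem' : Mem} {f : Nat} (h : M6OK Blk mem f) (hs : ObjSame f mem mem')
    (hC : stb_vorbis.channels mem f ≤ 16) : M6OK Blk mem' f :=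
  h.transfer (hs.sub (by decide)) hC (fun _ _ hb => hb)

/-- A change of the block predicate alone: the two blocks of every channel are still allocated. -/
theorem M6OK.reblk {Blk Blk' : Block → Prop} {mem : Mem} {f : Nat} (h : M6OK Blk mem f)
    (hB : ∀ B, M6OK.Owns mem f B → Blk B → Blk' B) : M6OK Blk' mem f :=
  h.congr rfl rfl (fun _ _ => rfl) (fun _ _ => rfl) hB

/-- **THE two-address frame lemma of `BuffersOK`** (M6 and M7): the windows `[4, 8)`, `[156, 160)`, `[872, 1000)`,
`[1128, 1260)` of `*f`, the two blocks of every channel still allocated. -/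
theorem BuffersOK.transfer {Blk Blk' : Block → Prop} {mem mem' : Mem} {p f : Nat} (h : BuffersOK Blk mem p)
    (he : ObjEq BuffersOK.wins mem p mem' f) (hC : stb_vorbis.channels mem p ≤ 16)
    (hB : ∀ B, BuffersOK.Owns mem p B → Blk B → Blk' B) : BuffersOK Blk' mem' f :=
  ⟨h.M6.transfer (he.sub (by decide)) hC hB, h.M7.transfer (he.sub (by decide))⟩

/-- **The frame lemma of `BuffersOK` for decode-time code, M7 given afresh**: decode-time code stores `previous_length`
(vorbis_finish_frame), so `DecodeSame` gives M6's windows only (`hd.sub (by decide)`); M7 of the new memory comes from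
`M7Range.of_finish` (the store) or from `M7Range.congr` (the field was not stored to). -/
theorem BuffersOK.transfer_m6 {Blk Blk' : Block → Prop} {mem mem' : Mem} {p f : Nat} (h : BuffersOK Blk mem p)
    (he : ObjEq M6OK.wins mem p mem' f) (hC : stb_vorbis.channels mem p ≤ 16)
    (hB : ∀ B, BuffersOK.Owns mem p B → Blk B → Blk' B) (h7 : M7Range mem' f) : BuffersOK Blk' mem' f :=
  ⟨h.M6.transfer he hC hB, h7⟩

/-- FRAME of `BuffersOK`: same address, `ObjSame`. -/
theorem BuffersOK.frame {Blk : Block → Prop} {mem mem' : Mem} {f : Nat} (h : BuffersOK Blk mem f) (hs : ObjSame f mem mem')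
    (hC : stb_vorbis.channels mem f ≤ 16) : BuffersOK Blk mem' f :=
  h.transfer (hs.sub (by decide)) hC (fun _ _ hb => hb)

/-- **FRAME of `BuffersOK` from the windows of `*f` as blocks** (`windows f` and `plWindow f` read the same), the two blocks of
every channel still allocated. -/
theorem BuffersOK.frame_windows {Blk Blk' : Block → Prop} {mem mem' : Mem} {f : Nat} (h : BuffersOK Blk mem f)
    (hf : f + Off.sizeof.stb_vorbis ≤ 2 ^ 64) (hw : ∀ W, W ∈ windows f → W.Same mem mem')
    (hp : (plWindow f).Same mem mem') (hC : stb_vorbis.channels mem f ≤ 16)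
    (hB : ∀ B, BuffersOK.Owns mem f B → Blk B → Blk' B) : BuffersOK Blk' mem' f := by
  have hr := ReadsSame.of_windows hf hw
  refine ⟨?_, h.M7.frame_windows hr hp hf⟩
  apply h.M6.congr hr.channels hr.blocksize_1 _ _ hB
  · intro i hi
    exact hr.channel_buffers i (by omega)
  · intro i hi
    exact hr.previous_window i (by omega)

/-- A change of the block predicate alone. -/
theorem BuffersOK.reblk {Blk Blk' : Block → Prop} {mem : Mem} {f : Nat} (h : BuffersOK Blk mem f)
    (hB : ∀ B, BuffersOK.Owns mem f B → Blk B → Blk' B) : BuffersOK Blk' mem f :=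
  ⟨h.M6.reblk hB, h.M7⟩

/-! #### What the top of the invariant asks of a group (`Group.Moves`, `Group.Carries` of Vorbis/Blocks.lean) -/

/-- **`MdctOK` follows the struct copy `*f = p` and has the coarse frame**: `Group.Good`. -/
theorem MdctOK.good : Group.Good MdctOK := by
  constructor
  · intro Blk Blk' mem mem' p f hm h
    exact h.transfer (hm.objEq (by decide)) (fun _ hR => hm.kept (h.reads_blk hR)) (fun B _ hb => hm.sub B hb)
  · intro Blk Blk' mem mem' f hk hB hob h
    have hobj := hk _ hob
    have he : ObjEq MdctOK.wins mem f mem' f := ObjEq.of_same hobj.same hobj.inside (by decide)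
    exact h.transfer he (fun _ hR => hk _ (h.reads_blk hR)) (fun B _ hb => hB B hb)

/-- **`BuffersOK` follows the struct copy `*f = p`**, given HD1's upper half of the original (`channels ≤ 16`). -/
theorem BuffersOK.moves {Blk Blk' : Block → Prop} {mem mem' : Mem} {p f : Nat} (hm : Move Blk Blk' mem mem' p f)
    (hC : stb_vorbis.channels mem p ≤ 16) (h : BuffersOK Blk mem p) : BuffersOK Blk' mem' f :=
  h.transfer (hm.objEq (by decide)) hC (fun B _ hb => hm.sub B hb)

/-- **The coarse frame of `BuffersOK`**, given HD1's upper half: every allocated block is kept, `*f` is one of them, no block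
was freed. -/
theorem BuffersOK.carries {Blk Blk' : Block → Prop} {mem mem' : Mem} {f : Nat} (hk : AllKept Blk mem mem')
    (hB : ∀ B, Blk B → Blk' B) (hob : Blk (objBlock f)) (hC : stb_vorbis.channels mem f ≤ 16) (h : BuffersOK Blk mem f) :
    BuffersOK Blk' mem' f := by
  have hobj := hk _ hob
  have he : ObjEq BuffersOK.wins mem f mem' f := ObjEq.of_same hobj.same hobj.inside (by decide)
  exact h.transfer he hC (fun B _ hb => hB B hb)

/-! ### 5. ESTABLISH

`compute_bitreverse` (loop 1309) establishes M4 for one table; `init_blocksize(f, b, n)` establishes `Tables` and `RevOK` for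
index `b`; `start_decoder`'s channel loop (4158) establishes M6 (SD.10: `BuffersOK.of_parts`); lines 4156, 4172–4173 store
`previous_length = 0` and `blocksize[]` (SD.11: `MdctOK.of_parts`). -/

/-- The loop invariant of `compute_bitreverse`: the entries below `i` satisfy M4's bound. -/
def RevUpTo (mem : Mem) (R n i : Nat) : Prop := ∀ j, j < i → mem.u16 (R + 2 * j) ≤ n / 2 - 4

/-- Before the first iteration. -/
theorem RevUpTo.zero (mem : Mem) (R n : Nat) : RevUpTo mem R n 0 := by
  intro j hj
  omega

/-- **One iteration**: the store `rev[i] = v` (`mov [r15], bx` at `r15 = rev + 2 i`) with `v ≤ n / 2 - 4`. The value the code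
stores is `(x >> (35 - ld)) << 2` for the 32-bit `x = bit_reverse(i)`: `rev_value` gives `v ≤ n / 2 - 4` and `v < 2 ^ 16`. -/
theorem RevUpTo.step {mem : Mem} {R n i v : Nat} (h : RevUpTo mem R n i) (hv : v ≤ n / 2 - 4) (hv16 : v < 2 ^ 16)
    (hR : R + 2 * i + 2 ≤ 2 ^ 64) : RevUpTo (mem.writeLE (addr (R + 2 * i)) 2 v) R n (i + 1) := by
  intro j hj
  by_cases hji : j = i
  · subst hji
    rw [Mem.u16_writeLE_same, Nat.mod_eq_of_lt hv16]
    exact hv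
  · have e : (addr (R + 2 * i)).toNat = R + 2 * i := toNat_addr _ (by omega)
    rw [Mem.u16_writeLE mem _ 2 v _ (by omega) (by omega) (by omega)]
    exact h j (by omega)

/-- The same with the stored value as the code computes it. -/
theorem RevUpTo.step_value {mem : Mem} {R n k i x : Nat} (h : RevUpTo mem R n i) (hk : Ld n k) (hx : x < 2 ^ 32)
    (hR : R + 2 * i + 2 ≤ 2 ^ 64) :
    RevUpTo (mem.writeLE (addr (R + 2 * i)) 2 ((x >>> (35 - k)) <<< 2)) R n (i + 1) := by
  have hval := rev_value hk x hx
  exact h.step hval.1 hval.2.1 hR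

/-- After the last iteration: M4 for this table. -/
theorem RevUpTo.done {mem : Mem} {R n : Nat} (h : RevUpTo mem R n (n / 8)) : RevOK mem R n := h

/-- The loop invariant of `start_decoder`'s channel loop (4158): the buffers of the channels below `i` are allocated. -/
def ChanUpTo (Blk : Block → Prop) (mem : Mem) (f i : Nat) : Prop :=
  ∀ j, j < i →
    Blk ⟨stb_vorbis.channel_buffers mem f j, 4 * bsize mem f 1⟩ ∧ Blk ⟨stb_vorbis.previous_window mem f j, 2 * bsize mem f 1⟩

/-- Before the first iteration. -/
theorem ChanUpTo.zero (Blk : Block → Prop) (mem : Mem) (f : Nat) : ChanUpTo Blk mem f 0 := by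
  intro j hj
  omega

/-- **One iteration of the channel loop**, over abstract stores: in the new memory the two pointer slots of the channels
below `i` and `blocksize_1` read as before, no block was freed, and the slots of channel `i` hold two allocated blocks (the
results of the two `setup_malloc`, NULL-checked at line 4162). -/
theorem ChanUpTo.step {Blk Blk' : Block → Prop} {mem mem' : Mem} {f i : Nat} (h : ChanUpTo Blk mem f i)
    (hcb : ∀ j, j < i → stb_vorbis.channel_buffers mem' f j = stb_vorbis.channel_buffers mem f j)
    (hpw : ∀ j, j < i → stb_vorbis.previous_window mem' f j = stb_vorbis.previous_window mem f j)
    (hb1 : stb_vorbis.blocksize_1 mem' f = stb_vorbis.blocksize_1 mem f) (hB : ∀ B, Blk B → Blk' B)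
    (hnew : Blk' ⟨stb_vorbis.channel_buffers mem' f i, 4 * bsize mem' f 1⟩ ∧
      Blk' ⟨stb_vorbis.previous_window mem' f i, 2 * bsize mem' f 1⟩) :
    ChanUpTo Blk' mem' f (i + 1) := by
  have eb : bsize mem' f 1 = bsize mem f 1 := by
    rw [bsize_one, bsize_one, hb1]
  intro j hj
  by_cases hji : j = i
  · subst hji
    exact hnew
  · have hlt : j < i := by omega
    rw [hcb j hlt, hpw j hlt, eb]
    exact ⟨hB _ (h j hlt).1, hB _ (h j hlt).2⟩

/-- The loop invariant carried over code that leaves the pointer slots of the channels below `i` and `blocksize_1` alone (an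
iteration's `memset`, the third `setup_malloc` of an iteration): `step` without a new channel. -/
theorem ChanUpTo.congr {Blk Blk' : Block → Prop} {mem mem' : Mem} {f i : Nat} (h : ChanUpTo Blk mem f i)
    (hcb : ∀ j, j < i → stb_vorbis.channel_buffers mem' f j = stb_vorbis.channel_buffers mem f j)
    (hpw : ∀ j, j < i → stb_vorbis.previous_window mem' f j = stb_vorbis.previous_window mem f j)
    (hb1 : stb_vorbis.blocksize_1 mem' f = stb_vorbis.blocksize_1 mem f) (hB : ∀ B, Blk B → Blk' B) :
    ChanUpTo Blk' mem' f i := by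
  have eb : bsize mem' f 1 = bsize mem f 1 := by
    rw [bsize_one, bsize_one, hb1]
  intro j hj
  rw [hcb j hj, hpw j hj, eb]
  exact ⟨hB _ (h j hj).1, hB _ (h j hj).2⟩

/-- After the loop (`i = channels`): M6. -/
theorem ChanUpTo.done {Blk : Block → Prop} {mem : Mem} {f i : Nat} (h : ChanUpTo Blk mem f i)
    (hi : stb_vorbis.channels mem f ≤ (i : Int)) : M6OK Blk mem f := by
  intro c hc
  exact h c (by omega)

/-- M7 at its establishment (line 4156, `previous_length = 0`). -/
theorem M7Range.of_zero {mem : Mem} {f : Nat} (h : stb_vorbis.previous_length mem f = 0) : M7Range mem f := by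
  unfold M7Range
  rw [h]
  omega

/-- M7 re-established by vorbis_finish_frame's store `previous_length = len - right` (W3: `len ≤ right_end ≤ b1`,
`0 ≤ right`, `len - right ≤ b1 / 2`, `0 ≤ len`). -/
theorem M7Range.of_finish {mem : Mem} {f : Nat} {len right : Int} (h : stb_vorbis.previous_length mem f = len - right)
    (h1 : 0 ≤ len) (h2 : right ≤ (bsize mem f 1 : Int)) (h3 : len - right ≤ ((bsize mem f 1 / 2 : Nat) : Int)) : M7Range mem f := by
  unfold M7Range
  rw [h]
  omega

/-- **SD.10: `BuffersOK` assembled** after the channel loop: the loop invariant at `i ≥ channels`, and M7 (from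
`previous_length = 0`, line 4156, carried over the loop's allocator calls by `M7Range.frame`). -/
theorem BuffersOK.of_parts {Blk : Block → Prop} {mem : Mem} {f i : Nat} (h : ChanUpTo Blk mem f i)
    (hi : stb_vorbis.channels mem f ≤ (i : Int)) (h7 : M7Range mem f) : BuffersOK Blk mem f :=
  ⟨h.done hi, h7⟩

/-- **SD.11: `MdctOK` assembled** from what the pieces of `start_decoder` leave: the two `init_blocksize` results (`Tables` and
`RevOK` for `b = 0, 1`, carried to this memory by `Tables.frame` / `RevOK.frame`) and the two stores of `blocksize[]`. -/
theorem MdctOK.of_parts {Blk : Block → Prop} {mem : Mem} {f : Nat}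
    (h20 : stb_vorbis.blocksize mem f 0 = stb_vorbis.blocksize_0 mem f)
    (h21 : stb_vorbis.blocksize mem f 1 = stb_vorbis.blocksize_1 mem f) (hd : HD3 mem f)
    (t0 : Tables Blk mem f 0 (bsize mem f 0)) (t1 : Tables Blk mem f 1 (bsize mem f 1))
    (r0 : RevOK mem (stb_vorbis.bit_reverse mem f 0) (bsize mem f 0))
    (r1 : RevOK mem (stb_vorbis.bit_reverse mem f 1) (bsize mem f 1)) : MdctOK Blk mem f := by
  have two : ∀ b, b < 2 → b = 0 ∨ b = 1 := by
    intro b hb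
    omega
  refine ⟨?_, ?_, ?_⟩
  · intro b hb
    rcases two b hb with rfl | rfl
    · rw [h20]
      exact hd.blocksize_0_eq
    · rw [h21]
      exact hd.blocksize_1_eq
  · intro b hb
    rcases two b hb with rfl | rfl
    · exact t0
    · exact t1
  · intro b hb
    rcases two b hb with rfl | rfl
    · exact r0
    · exact r1

end Vorbis.Mdct
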